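-- pv_equiv track=rewrite | github.com/captainGeech42/AdventOfCode | 2018/day02/solve.py | get_uniq_chr_count
-- ===== SOURCE A (Python) =====
-- def get_uniq_chr_count(word):
--     chrs = {}
--     for c in word:
--         if c in chrs:
--             chrs[c] += 1
--         else:
--             chrs[c] = 1
--
--     two = 2 in chrs.values()
--     three = 3 in chrs.values()
--
--     return two, three
-- ===== SOURCE B (Python) =====
-- def get_uniq_chr_count(word):
--     # Successive elimination: repeatedly strip every copy of the first remaining
--     # character and read its multiplicity off the length drop -- no frequency
--     # table is ever built.
--     two = False
--     three = False
--     rest = list(word)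
--     while rest:
--         c = rest[0]
--         n = len(rest)
--         rest = [x for x in rest if x != c]
--         if n - len(rest) == 2:
--             two = True
--         elif n - len(rest) == 3:
--             three = True
--     return two, three
-- ===== Notes on version B (the rewrite author's own statement) =====
-- stated objective: alternative
-- what changed: Replaces A's frequency-dictionary build plus values() membership tests by a successive-elimination loop that repeatedly strips all copies of the first remaining character and reads that character's multiplicity off the length drop, so no counting container exists at all.
import Mathlib
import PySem

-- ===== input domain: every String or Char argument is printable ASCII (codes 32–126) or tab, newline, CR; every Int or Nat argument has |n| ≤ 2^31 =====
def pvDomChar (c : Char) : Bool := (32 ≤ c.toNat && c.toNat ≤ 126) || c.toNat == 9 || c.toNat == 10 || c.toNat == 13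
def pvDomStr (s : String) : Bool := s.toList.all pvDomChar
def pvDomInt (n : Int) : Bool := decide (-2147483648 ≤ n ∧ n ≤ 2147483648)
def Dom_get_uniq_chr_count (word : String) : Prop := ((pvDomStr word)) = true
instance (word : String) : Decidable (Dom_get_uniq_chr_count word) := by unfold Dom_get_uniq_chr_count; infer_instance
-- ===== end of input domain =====

-- B drops A's frequency dictionary for a successive-elimination loop (strip all
-- copies of the first remaining character, read the count off the length drop);
-- same cost class, genuinely different traversal.

-- ===== PORT A =====
def get_uniq_chr_count (word : String) : Bool × Bool :=
  let chrs := word.toList.foldl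
    (fun d c => if d.contains c then d.insert c (d.getD c 0 + 1) else d.insert c 1)
    (PySem.Dict.empty : PySem.Dict Char Int)
  let two := (chrs.values).contains (2 : Int)
  let three := (chrs.values).contains (3 : Int)
  (two, three)

-- ===== PORT B =====
-- the while loop of Source B: rest, two, three are the loop state; the list
-- comprehension '[x for x in rest if x != c]' is List.filter
def pvStrip : List Char → Bool → Bool → Bool × Bool
  | [], two, three => (two, three)
  | c :: t, two, three =>
    let n := (c :: t).length
    let rest := (c :: t).filter (fun x => x ≠ c)
    if n - rest.length = 2 then pvStrip rest true three
    else if n - rest.length = 3 then pvStrip rest two true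
    else pvStrip rest two three
termination_by l => l.length
decreasing_by
  all_goals
    simp only [List.filter_cons, List.length_cons, ne_eq, not_true_eq_false,
      decide_false, Bool.false_eq_true, if_false]
    have := List.length_filter_le (fun x => decide ¬x = c) t
    omega

def get_uniq_chr_count_alt (word : String) : Bool × Bool :=
  pvStrip word.toList false false

-- ===== PRECONDITION & SPEC =====
def Spec_get_uniq_chr_count (word : String) (out : Bool × Bool) : Prop := out = get_uniq_chr_count_alt word
instance (word : String) (out : Bool × Bool) : Decidable (Spec_get_uniq_chr_count word out) := by unfold Spec_get_uniq_chr_count; infer_instance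

-- ===== CLAIM (what is proved, stated in full; the proofs are below) =====
def Claim_equal_get_uniq_chr_count : Prop := ∀ (word : String), Dom_get_uniq_chr_count word → Spec_get_uniq_chr_count word (get_uniq_chr_count word)

-- ===== LEMMAS AND PROOFS =====

-- A's branchy update step is the counter-building step
theorem pv_stepA_eq (d : PySem.Dict Char Int) (c : Char) :
    (if d.contains c then d.insert c (d.getD c 0 + 1) else d.insert c 1) =
      d.insert c (d.getD c 0 + 1) := by
  by_cases h : d.contains c = true
  · simp [h]
  · have h' : d.contains c = false := by simpa using h
    rw [PySem.Dict.getD_of_not_contains d (0:Int) h']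
    simp [h']

theorem pv_dict_eq_counter (l : List Char) :
    l.foldl (fun d c => if d.contains c then d.insert c (d.getD c 0 + 1) else d.insert c 1)
      (PySem.Dict.empty : PySem.Dict Char Int) = PySem.Dict.counter l := by
  rw [← PySem.Dict.foldl_insert_getD_add_one_eq_counter]
  congr 1
  funext d c
  exact pv_stepA_eq d c

theorem pv_values_counter (l : List Char) :
    (PySem.Dict.counter l).values = (PySem.Set.ofList l).map (fun k => (l.count k : Int)) := by
  show ((PySem.Dict.counter l).items).map (·.2) = _
  rw [PySem.Dict.items_counter]
  simp [List.map_map, Function.comp]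

-- the length drop measured by B's loop is the head character's multiplicity
theorem pv_len_split (c : Char) (l : List Char) :
    l.length = (l.filter (fun x => x ≠ c)).length + l.count c := by
  induction l with
  | nil => simp
  | cons a t ih =>
    by_cases h : a = c <;>
      simp [h, ih] <;> omega

theorem pv_drop_eq_count (c : Char) (t : List Char) :
    (c :: t).length - ((c :: t).filter (fun x => x ≠ c)).length = (c :: t).count c := by
  have := pv_len_split c (c :: t)
  omega

-- pushing one elimination step through the "some char occurs m times" predicate
theorem pv_exists_step (c : Char) (t : List Char) (m : Nat) :
    (∃ x ∈ c :: t, (c :: t).count x = m) ↔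
      ((c :: t).count c = m ∨ ∃ x ∈ (c :: t).filter (fun y => y ≠ c), ((c :: t).filter (fun y => y ≠ c)).count x = m) := by
  constructor
  · rintro ⟨x, hx, hm⟩
    by_cases hxc : x = c
    · exact Or.inl (hxc ▸ hm)
    · refine Or.inr ⟨x, ?_, ?_⟩
      · exact List.mem_filter.mpr ⟨hx, by simp [hxc]⟩
      · rw [List.count_filter (by simp [hxc])]; exact hm
  · rintro (h | ⟨x, hx, hm⟩)
    · exact ⟨c, by simp, h⟩
    · rcases List.mem_filter.mp hx with ⟨hxl, hxc⟩
      have hxc' : x ≠ c := by simpa using hxc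
      refine ⟨x, hxl, ?_⟩
      rw [List.count_filter (by simpa using hxc')] at hm
      exact hm

-- B's loop returns (two OR some char occurs twice, three OR some char thrice)
theorem pvStrip_eq (l : List Char) (two three : Bool) :
    pvStrip l two three =
      (two || decide (∃ x ∈ l, l.count x = 2), three || decide (∃ x ∈ l, l.count x = 3)) := by
  have main : ∀ (n : Nat) (l : List Char), l.length ≤ n → ∀ two three,
      pvStrip l two three =
        (two || decide (∃ x ∈ l, l.count x = 2), three || decide (∃ x ∈ l, l.count x = 3)) := by
    intro n
    induction n with
    | zero =>
      intro l hl two three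
      have : l = [] := List.eq_nil_of_length_eq_zero (Nat.le_zero.mp hl)
      subst this; simp [pvStrip]
    | succ n ih =>
      intro l hl two three
      match l with
      | [] => simp [pvStrip]
      | c :: t =>
        have hrest : ((c :: t).filter (fun x => x ≠ c)).length ≤ n := by
          have := pv_len_split c (c :: t)
          simp only [List.length_cons] at this hl
          have hc : 1 ≤ (c :: t).count c := List.one_le_count_iff.mpr (by simp)
          omega
        rw [pvStrip]
        simp only [pv_drop_eq_count]
        have e2 := pv_exists_step c t 2
        have e3 := pv_exists_step c t 3
        by_cases h2 : (c :: t).count c = 2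
        · rw [if_pos h2, ih _ hrest]
          have d2 : decide (∃ x ∈ c :: t, (c :: t).count x = 2) = true := by
            rw [decide_eq_true_iff]; exact e2.mpr (Or.inl h2)
          have d3 : decide (∃ x ∈ c :: t, (c :: t).count x = 3) =
              decide (∃ x ∈ (c :: t).filter (fun y => y ≠ c),
                ((c :: t).filter (fun y => y ≠ c)).count x = 3) := by
            rw [decide_eq_decide]
            exact e3.trans (or_iff_right (by omega))
          rw [d2, d3]; simp
        · rw [if_neg h2]
          by_cases h3 : (c :: t).count c = 3
          · rw [if_pos h3, ih _ hrest]
            have d3 : decide (∃ x ∈ c :: t, (c :: t).count x = 3) = true := by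
              rw [decide_eq_true_iff]; exact e3.mpr (Or.inl h3)
            have d2 : decide (∃ x ∈ c :: t, (c :: t).count x = 2) =
                decide (∃ x ∈ (c :: t).filter (fun y => y ≠ c),
                  ((c :: t).filter (fun y => y ≠ c)).count x = 2) := by
              rw [decide_eq_decide]
              exact e2.trans (or_iff_right (by omega))
            rw [d2, d3]; simp
          · rw [if_neg h3, ih _ hrest]
            have d2 : decide (∃ x ∈ c :: t, (c :: t).count x = 2) =
                decide (∃ x ∈ (c :: t).filter (fun y => y ≠ c),
                  ((c :: t).filter (fun y => y ≠ c)).count x = 2) := by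
              rw [decide_eq_decide]
              exact e2.trans (or_iff_right h2)
            have d3 : decide (∃ x ∈ c :: t, (c :: t).count x = 3) =
                decide (∃ x ∈ (c :: t).filter (fun y => y ≠ c),
                  ((c :: t).filter (fun y => y ≠ c)).count x = 3) := by
              rw [decide_eq_decide]
              exact e3.trans (or_iff_right h3)
            rw [d2, d3]
  exact main l.length l le_rfl two three

-- "2 in chrs.values()" is "some character occurs exactly m times"
theorem pv_contains_map (l : List Char) (m : Nat) :
    ((PySem.Set.ofList l).map (fun k => (l.count k : Int))).contains (m : Int) =
      decide (∃ x ∈ l, l.count x = m) := by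
  rw [Bool.eq_iff_iff, List.contains_iff_mem, decide_eq_true_iff]
  constructor
  · rintro hm
    rcases List.mem_map.mp hm with ⟨x, hx, hc⟩
    exact ⟨x, (PySem.Set.mem_ofList _ _).mp hx, by exact_mod_cast hc⟩
  · rintro ⟨x, hx, hc⟩
    exact List.mem_map.mpr ⟨x, (PySem.Set.mem_ofList _ _).mpr hx, by exact_mod_cast hc⟩

-- ===== VERDICT (by name: the statement is the Claim_ definition above) =====
theorem get_uniq_chr_count_spec : Claim_equal_get_uniq_chr_count := by
  intro word _
  show get_uniq_chr_count word = get_uniq_chr_count_alt word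
  unfold get_uniq_chr_count get_uniq_chr_count_alt
  rw [pvStrip_eq]
  simp only [pv_dict_eq_counter, pv_values_counter, Bool.false_or]
  have h2 := pv_contains_map word.toList 2
  have h3 := pv_contains_map word.toList 3
  push_cast at h2 h3
  rw [h2, h3]
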